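-- pv_equiv track=rewrite | github.com/simrananand-2-11/100DaysOfCode | pract5.py | AsciiTotalString
-- ===== SOURCE A (Python) =====
-- def AsciiTotalString(stringInput,sumArray):
--     length = len(stringInput)
--     total = 0
--     ActualTotal = 0
--     for i in range(length):
--         if(stringInput[i] == ' '):
--             ActualTotal += total
--             sumArray.append(total)
--             total = 0
--         else:
--             total += ord(stringInput[i])
--     sumArray.append(total)
--     ActualTotal += total
--     return ActualTotal
-- ===== SOURCE B (Python) =====
-- def AsciiTotalString(stringInput, sumArray):
--     # tokenize-then-sum: split on single spaces, sum each word's ASCII codes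
--     words = stringInput.split(' ')
--     ActualTotal = 0
--     for word in words:
--         total = sum(ord(c) for c in word)
--         sumArray.append(total)
--         ActualTotal += total
--     return ActualTotal
-- ===== Notes on version B (the rewrite author's own statement) =====
-- stated objective: simpler
-- what changed: Replaces A's character-by-character delimiter state machine (running total reset on each space) with a two-phase tokenize-then-sum: split the string on single spaces and sum each word's character codes.
import Mathlib
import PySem

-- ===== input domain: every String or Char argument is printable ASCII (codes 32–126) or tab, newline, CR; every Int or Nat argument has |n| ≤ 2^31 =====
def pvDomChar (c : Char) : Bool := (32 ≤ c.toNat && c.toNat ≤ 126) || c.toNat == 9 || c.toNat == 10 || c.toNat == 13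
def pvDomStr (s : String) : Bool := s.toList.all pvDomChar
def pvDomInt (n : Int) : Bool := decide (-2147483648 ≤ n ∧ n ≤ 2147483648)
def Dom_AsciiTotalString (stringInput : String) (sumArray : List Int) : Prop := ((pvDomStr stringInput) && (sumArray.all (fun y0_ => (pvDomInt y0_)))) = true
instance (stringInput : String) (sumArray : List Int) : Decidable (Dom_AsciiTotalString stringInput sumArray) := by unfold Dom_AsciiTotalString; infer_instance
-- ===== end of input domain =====

-- B replaces A's per-character delimiter state machine with tokenize (split on ' ') then per-word sums; simpler.
-- Both A and B append the per-word sums to sumArray in Python; the equivalence proved here is about the RETURN value only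
-- (the mutation is identical in both, but sumArray mutation is not modelled in the ports).

-- ===== PORT A =====
-- the loop body of A: state is (total, ActualTotal), c is stringInput[i]
def pvStepA (st : Int × Int) (c : Char) : Int × Int :=
  if c = ' ' then (0, st.2 + st.1) else (st.1 + (c.toNat : Int), st.2)

def AsciiTotalString (stringInput : String) (sumArray : List Int) : Int :=
  let length := PySem.Str.len stringInput
  let st := (PySem.List.pyRange 0 length).foldl
    (fun (st : Int × Int) i => pvStepA st (PySem.List.pyGetD stringInput.toList i ' '))
    (0, 0)
  st.2 + st.1

-- ===== PORT B =====
def AsciiTotalString_alt (stringInput : String) (sumArray : List Int) : Int :=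
  let words := (PySem.Str.split? stringInput " ").getD []
  words.foldl (fun acc w => acc + (w.toList.map (fun c => (c.toNat : Int))).sum) 0

-- ===== PRECONDITION & SPEC =====
def Spec_AsciiTotalString (stringInput : String) (sumArray : List Int) (out : Int) : Prop := out = AsciiTotalString_alt stringInput sumArray
instance (stringInput : String) (sumArray : List Int) (out : Int) : Decidable (Spec_AsciiTotalString stringInput sumArray out) := by unfold Spec_AsciiTotalString; infer_instance

-- ===== CLAIM (what is proved, stated in full; the proofs are below) =====
def Claim_equal_AsciiTotalString : Prop := ∀ (stringInput : String) (sumArray : List Int), Dom_AsciiTotalString stringInput sumArray → Spec_AsciiTotalString stringInput sumArray (AsciiTotalString stringInput sumArray)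

-- ===== LEMMAS AND PROOFS =====

-- sum of codes of a word
def pvW (l : List Char) : Int := (l.map (fun c => (c.toNat : Int))).sum
-- sum over a list of words
def pvS (ps : List (List Char)) : Int := (ps.map pvW).sum
-- sum of codes of the non-space characters
def pvSF (l : List Char) : Int := ((l.filter (fun c => !(c = ' '))).map (fun c => (c.toNat : Int))).sum

theorem pvSF_cons (c : Char) (l : List Char) :
    pvSF (c :: l) = (if c = ' ' then 0 else (c.toNat : Int)) + pvSF l := by
  by_cases h : c = ' ' <;> simp [pvSF, h]

theorem pvS_reverse (ps : List (List Char)) : pvS ps.reverse = pvS ps := by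
  simp [pvS]

theorem pvS_cons (p : List Char) (ps : List (List Char)) : pvS (p :: ps) = pvW p + pvS ps := by
  simp [pvS]

theorem pvW_reverse (l : List Char) : pvW l.reverse = pvW l := by
  simp [pvW]

-- A's loop invariant
theorem foldA (l : List Char) : ∀ t a : Int,
    (l.foldl pvStepA (t, a)).2 + (l.foldl pvStepA (t, a)).1 = a + t + pvSF l := by
  induction l with
  | nil => intro t a; simp [pvSF]
  | cons c rest ih =>
    intro t a
    by_cases h : c = ' ' <;>
      simp [pvStepA, h, ih, pvSF_cons] <;> ring

-- the splitOn worker: total over produced words = total so far + current word + non-space codes left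
theorem go_sum (fuel : Nat) : ∀ (l cur : List Char) (acc : List (List Char)),
    l.length < fuel →
    pvS (PySem.Chars.splitOn.go [' '] fuel l cur acc) = pvS acc + pvW cur + pvSF l := by
  induction fuel with
  | zero => intro l cur acc h; omega
  | succ fuel ih =>
    intro l cur acc h
    cases l with
    | nil =>
      simp [PySem.Chars.splitOn.go, pvS, pvW, pvSF]
    | cons c rest =>
      by_cases hc : c = ' '
      · have hpre : List.isPrefixOf [' '] (c :: rest) = true := by simp [hc]
        rw [PySem.Chars.splitOn.go, if_pos hpre]
        simp only [List.length_cons] at h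
        rw [ih _ _ _ (by simpa using Nat.lt_of_succ_lt_succ h)]
        simp [pvS_reverse, pvS_cons, pvW_reverse, pvSF_cons, hc, pvW]
        ring
      · have hpre : List.isPrefixOf [' '] (c :: rest) = false := by
          simp [List.isPrefixOf]; exact fun h => hc h.symm
        rw [PySem.Chars.splitOn.go, if_neg (by simp [hpre])]
        simp only [List.length_cons] at h
        rw [ih _ _ _ (Nat.lt_of_succ_lt_succ h)]
        simp [pvSF_cons, hc, pvW]
        ring

theorem splitOn_sum (l : List Char) : pvS (PySem.Chars.splitOn l [' ']) = pvSF l := by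
  unfold PySem.Chars.splitOn
  rw [go_sum (l.length + 1) l [] [] (by omega)]
  simp [pvS, pvW]

theorem foldl_add_W (ps : List (List Char)) : ∀ a : Int,
    ps.foldl (fun acc p => acc + pvW p) a = a + pvS ps := by
  induction ps with
  | nil => intro a; simp [pvS]
  | cons p ps ih => intro a; simp [ih, pvS_cons]; ring

theorem AsciiTotalString_eq (s : String) (xs : List Int) :
    AsciiTotalString s xs = pvSF s.toList := by
  have h := PySem.List.foldl_pyRange_pyGetD s.toList ' ' pvStepA ((0 : Int), (0 : Int)) (le_refl 0)
  simp only [Int.toNat_zero, List.drop_zero] at h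
  show (List.foldl (fun st i => pvStepA st (PySem.List.pyGetD s.toList i ' ')) (0, 0)
      (PySem.List.pyRange 0 (PySem.Str.len s))).2 +
    (List.foldl (fun st i => pvStepA st (PySem.List.pyGetD s.toList i ' ')) (0, 0)
      (PySem.List.pyRange 0 (PySem.Str.len s))).1 = pvSF s.toList
  rw [show PySem.Str.len s = PySem.List.len s.toList from rfl, h]
  simp [foldA]

theorem AsciiTotalString_alt_eq (s : String) (xs : List Int) :
    AsciiTotalString_alt s xs = pvSF s.toList := by
  unfold AsciiTotalString_alt
  have h : PySem.Str.split? s " " =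
      some ((PySem.Chars.splitOn s.toList [' ']).map String.ofList) := by
    simp [PySem.Str.split?, PySem.Chars.split?]
  rw [h]
  simp only [Option.getD_some, List.foldl_map, String.toList_ofList]
  rw [show (fun (acc : Int) (w : List Char) => acc + (w.map (fun c => (c.toNat : Int))).sum)
        = (fun acc w => acc + pvW w) from rfl]
  rw [foldl_add_W, splitOn_sum]
  ring

-- ===== VERDICT (by name: the statement is the Claim_ definition above) =====
theorem AsciiTotalString_spec : Claim_equal_AsciiTotalString := by
  intro s xs _
  unfold Spec_AsciiTotalString
  rw [AsciiTotalString_eq, AsciiTotalString_alt_eq]
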